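-- pv_equiv track=rewrite | github.com/pakaufmann/AdventofCode2020 | day24.py | run_instructions
-- ===== SOURCE A (Python) =====
-- def run_instructions(instructions: list[str]):
--     hexagon = [0, 0, 0]
--
--     for instruction in instructions:
--         if instruction == "e":
--             hexagon[0] += 1
--             hexagon[2] -= 1
--         elif instruction == "se":
--             hexagon[1] += 1
--             hexagon[2] -= 1
--         elif instruction == "sw":
--             hexagon[0] -= 1
--             hexagon[1] += 1
--         elif instruction == "w":
--             hexagon[0] -= 1
--             hexagon[2] += 1
--         elif instruction == "nw":
--             hexagon[1] -= 1
--             hexagon[2] += 1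
--         elif instruction == "ne":
--             hexagon[0] += 1
--             hexagon[1] -= 1
--         else:
--             raise Exception("invalid instruction: ", instruction)
--
--     return tuple(hexagon)
-- ===== SOURCE B (Python) =====
-- def run_instructions(instructions: list[str]):
--     counts = {}
--     for instruction in instructions:
--         if instruction not in ("e", "se", "sw", "w", "nw", "ne"):
--             raise Exception("invalid instruction: ", instruction)
--         counts[instruction] = counts.get(instruction, 0) + 1
--     e = counts.get("e", 0)
--     se = counts.get("se", 0)
--     sw = counts.get("sw", 0)
--     w = counts.get("w", 0)
--     nw = counts.get("nw", 0)
--     ne = counts.get("ne", 0)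
--     return (e - sw - w + ne, se + sw - nw - ne, -e - se + w + nw)
-- ===== Notes on version B (the rewrite author's own statement) =====
-- stated objective: alternative
-- what changed: B replaces the per-step coordinate accumulator with a single counting pass building a frequency dict of the six direction strings, then computes the final cube coordinate in closed form from the six counts.
import Mathlib
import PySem

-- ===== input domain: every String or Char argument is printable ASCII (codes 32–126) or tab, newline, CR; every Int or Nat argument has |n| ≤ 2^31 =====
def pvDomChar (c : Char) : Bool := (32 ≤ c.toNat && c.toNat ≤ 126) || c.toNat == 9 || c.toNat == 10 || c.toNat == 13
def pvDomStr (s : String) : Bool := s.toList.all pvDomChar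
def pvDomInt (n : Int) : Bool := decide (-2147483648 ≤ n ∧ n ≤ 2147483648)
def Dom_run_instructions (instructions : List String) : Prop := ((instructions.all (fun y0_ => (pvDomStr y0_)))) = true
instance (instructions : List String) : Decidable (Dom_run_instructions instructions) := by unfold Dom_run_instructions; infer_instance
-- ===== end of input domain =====

-- B replaces A's per-step coordinate accumulator with a counting pass (frequency dict of the six
-- direction strings) followed by a closed-form aggregation of the counts; same O(n) cost.


-- ===== PORT A =====
-- literal transliteration of A: fold the running [x, y, z] accumulator over the instructions.
-- On an invalid instruction Python raises (excluded by Pre_); the port leaves the state unchanged there.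
def run_instructions (instructions : List String) : Int × Int × Int :=
  instructions.foldl (fun h ins =>
    if ins == "e" then (h.1 + 1, h.2.1, h.2.2 - 1)
    else if ins == "se" then (h.1, h.2.1 + 1, h.2.2 - 1)
    else if ins == "sw" then (h.1 - 1, h.2.1 + 1, h.2.2)
    else if ins == "w" then (h.1 - 1, h.2.1, h.2.2 + 1)
    else if ins == "nw" then (h.1, h.2.1 - 1, h.2.2 + 1)
    else if ins == "ne" then (h.1 + 1, h.2.1 - 1, h.2.2)
    else h) (0, 0, 0)

-- ===== PORT B =====
-- literal transliteration of B: one counting pass building a dict, then the closed-form result.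
-- On an invalid instruction Python raises (excluded by Pre_); the port leaves the dict unchanged there.
def run_instructions_alt (instructions : List String) : Int × Int × Int :=
  let counts := instructions.foldl (fun d ins =>
    if ins == "e" || ins == "se" || ins == "sw" || ins == "w" || ins == "nw" || ins == "ne"
    then d.insert ins (d.getD ins 0 + 1)
    else d) (PySem.Dict.empty : PySem.Dict String Int)
  let e := counts.getD "e" 0
  let se := counts.getD "se" 0
  let sw := counts.getD "sw" 0
  let w := counts.getD "w" 0
  let nw := counts.getD "nw" 0
  let ne := counts.getD "ne" 0
  (e - sw - w + ne, se + sw - nw - ne, -e - se + w + nw)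

-- ===== PRECONDITION & SPEC =====
-- Pre_ excludes exactly the inputs containing a token other than the six directions, on which A
-- (and B) raise Exception("invalid instruction: ", instruction).
def Pre_run_instructions (instructions : List String) : Prop :=
  ∀ s ∈ instructions, s = "e" ∨ s = "se" ∨ s = "sw" ∨ s = "w" ∨ s = "nw" ∨ s = "ne"
instance (instructions : List String) : Decidable (Pre_run_instructions instructions) := by unfold Pre_run_instructions; infer_instance
def pvWitness_run_instructions : List String := ["e", "se", "sw", "w", "nw", "ne", "e"]
def Spec_run_instructions (instructions : List String) (out : Int × Int × Int) : Prop := out = run_instructions_alt instructions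
instance (instructions : List String) (out : Int × Int × Int) : Decidable (Spec_run_instructions instructions out) := by unfold Spec_run_instructions; infer_instance

-- ===== CLAIM (what is proved, stated in full; the proofs are below) =====
def Claim_equal_run_instructions : Prop := ∀ (instructions : List String), Dom_run_instructions instructions → Pre_run_instructions instructions → Spec_run_instructions instructions (run_instructions instructions)

-- ===== LEMMAS AND PROOFS =====

-- A's fold, on a list of valid tokens, adds to the start state the per-direction count contributions.
lemma runA_fold (l : List String) :
    ∀ (x y z : Int), (∀ s ∈ l, s = "e" ∨ s = "se" ∨ s = "sw" ∨ s = "w" ∨ s = "nw" ∨ s = "ne") →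
    l.foldl (fun h ins =>
      if ins == "e" then (h.1 + 1, h.2.1, h.2.2 - 1)
      else if ins == "se" then (h.1, h.2.1 + 1, h.2.2 - 1)
      else if ins == "sw" then (h.1 - 1, h.2.1 + 1, h.2.2)
      else if ins == "w" then (h.1 - 1, h.2.1, h.2.2 + 1)
      else if ins == "nw" then (h.1, h.2.1 - 1, h.2.2 + 1)
      else if ins == "ne" then (h.1 + 1, h.2.1 - 1, h.2.2)
      else h) (x, y, z) =
    (x + l.count "e" - l.count "sw" - l.count "w" + l.count "ne",
     y + l.count "se" + l.count "sw" - l.count "nw" - l.count "ne",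
     z - l.count "e" - l.count "se" + l.count "w" + l.count "nw") := by
  induction l with
  | nil => intro x y z _; simp
  | cons a t ih =>
    intro x y z h
    have ha := h a (by simp)
    have ht : ∀ s ∈ t, s = "e" ∨ s = "se" ∨ s = "sw" ∨ s = "w" ∨ s = "nw" ∨ s = "ne" :=
      fun s hs => h s (by simp [hs])
    rcases ha with h1 | h1 | h1 | h1 | h1 | h1 <;> subst h1 <;>
      rw [List.foldl_cons] <;>
      rw [ih _ _ _ ht] <;>
      refine Prod.ext ?_ (Prod.ext ?_ ?_) <;>
      simp [List.count_cons] <;> try (push_cast; ring)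

-- B's counting fold, on valid tokens, is the Counter of the list.
lemma runB_fold (l : List String)
    (h : ∀ s ∈ l, s = "e" ∨ s = "se" ∨ s = "sw" ∨ s = "w" ∨ s = "nw" ∨ s = "ne") :
    l.foldl (fun d ins =>
      if ins == "e" || ins == "se" || ins == "sw" || ins == "w" || ins == "nw" || ins == "ne"
      then d.insert ins (d.getD ins 0 + 1)
      else d) (PySem.Dict.empty : PySem.Dict String Int) = PySem.Dict.counter l := by
  rw [← PySem.Dict.foldl_insert_getD_add_one_eq_counter]
  apply PySem.List.foldl_congr_mem
  intro d s hs
  rcases h s hs with h1 | h1 | h1 | h1 | h1 | h1 <;> subst h1 <;> rfl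

-- ===== VERDICT (by name: the statement is the Claim_ definition above) =====
theorem run_instructions_spec : Claim_equal_run_instructions := by
  intro l _ hpre
  unfold Spec_run_instructions run_instructions run_instructions_alt
  rw [runB_fold l hpre, runA_fold l 0 0 0 hpre]
  simp [PySem.Dict.getD_counter]
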